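-- pv_equiv track=rewrite | github.com/bgoonz/UsefulResourceRepo2.0 | _BACKUPS/my-gists/__CONTAINER/76acedd4d2c1d/08-LongestSemiAlternatingSubString.py | longest_semialternating_ss
-- ===== SOURCE A (Python) =====
-- def longest_semialternating_ss(s):
--     length = len(s)
--     if not s or length == 0:
--         return 0
--
--     if length < 3:
--         return length
--
--     beginning = 0
--     end = 1
--     # first character
--     comparison_char = s[0]
--     # count the occurrence of the first char
--     count_first_char = 1
--     max_length = 1
--
--     while end < length:
--         end_char = s[end]
--         if end_char == comparison_char:
--             # add one to char count
--             count_first_char += 1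
--             # if char found at least two times
--             if count_first_char == 2:
--                 x = end - beginning + 1
--                 if x > max_length:
--                     max_length = x
--             elif count_first_char > 2:
--                 # reset beginning pointer
--                 beginning = end - 1
--         else:
--             comparison_char = end_char
--             count_first_char = 1
--             if end - beginning + 1 > max_length:
--                 max_length = end - beginning + 1
--         end += 1
--
--     return max_length
-- ===== SOURCE B (Python) =====
-- import itertools
--
-- def longest_semialternating_ss(s):
--     # Run-length-encode s, then scan runs: a run of length >= 3 collapses
--     # the current window to its last two characters.
--     ans = cur = 0
--     for _, g in itertools.groupby(s):
--         L = len(list(g))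
--         if L >= 3:
--             ans = max(ans, cur + 2)
--             cur = 2
--         else:
--             cur += L
--             ans = max(ans, cur)
--     return ans
-- ===== Notes on version B (the rewrite author's own statement) =====
-- stated objective: simpler
-- what changed: Replaces the two-pointer character scan with per-character count bookkeeping by run-length encoding the string (itertools.groupby) and folding over the runs, which also removes the short-string early returns.
import Mathlib
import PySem

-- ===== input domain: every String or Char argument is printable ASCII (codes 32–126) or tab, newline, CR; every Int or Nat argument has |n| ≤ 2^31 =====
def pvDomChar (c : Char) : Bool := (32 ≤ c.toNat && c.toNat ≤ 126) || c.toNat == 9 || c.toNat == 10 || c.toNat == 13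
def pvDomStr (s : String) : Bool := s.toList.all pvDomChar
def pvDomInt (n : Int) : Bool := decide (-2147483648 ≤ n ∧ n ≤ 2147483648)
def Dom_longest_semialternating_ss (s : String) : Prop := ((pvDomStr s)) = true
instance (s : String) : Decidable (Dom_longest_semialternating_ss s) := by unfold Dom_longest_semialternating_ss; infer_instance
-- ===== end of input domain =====

-- B rewrites A's two-pointer character scan as run-length-encode-then-fold-over-runs (objective: simpler).

-- ===== PORT A =====
-- the while loop of A: (remaining chars, end, beginning, comparison_char, count_first_char, max_length)
def aloopA : List Char → Int → Int → Char → Int → Int → Int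
  | [], _, _, _, _, m => m
  | ec :: rest, e, b, comp, count, m =>
    if ec = comp then
      let count' := count + 1
      if count' = 2 then
        aloopA rest (e + 1) b comp count' (if e - b + 1 > m then e - b + 1 else m)
      else if count' > 2 then
        aloopA rest (e + 1) (e - 1) comp count' m
      else
        aloopA rest (e + 1) b comp count' m
    else
      aloopA rest (e + 1) b ec 1 (if e - b + 1 > m then e - b + 1 else m)

def longest_semialternating_ss (s : String) : Int :=
  let l := s.toList
  let length : Int := l.length
  if l = [] ∨ length = 0 then 0
  else if length < 3 then length
  else
    match l with
    | [] => 0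
    | c :: rest => aloopA rest 1 0 c 1 1

-- ===== PORT B =====
-- one fold step over a run (char, length): state (ans, cur)
def bstep (p : Int × Int) (r : Char × Int) : Int × Int :=
  if r.2 ≥ 3 then (max p.1 (p.2 + 2), 2) else (max p.1 (p.2 + r.2), p.2 + r.2)

-- itertools.groupby: run-length encoding
def runsOf : List Char → List (Char × Int)
  | [] => []
  | c :: cs =>
      (c, ((cs.takeWhile (· == c)).length : Int) + 1) :: runsOf (cs.dropWhile (· == c))
  termination_by l => l.length
  decreasing_by
    exact Nat.lt_succ_of_le (List.length_dropWhile_le _ _)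

def longest_semialternating_ss_alt (s : String) : Int :=
  ((runsOf s.toList).foldl bstep (0, 0)).1

-- ===== PRECONDITION & SPEC =====
def Spec_longest_semialternating_ss (s : String) (out : Int) : Prop := out = longest_semialternating_ss_alt s
instance (s : String) (out : Int) : Decidable (Spec_longest_semialternating_ss s out) := by unfold Spec_longest_semialternating_ss; infer_instance

-- ===== CLAIM (what is proved, stated in full; the proofs are below) =====
def Claim_equal_longest_semialternating_ss : Prop := ∀ (s : String), Dom_longest_semialternating_ss s → Spec_longest_semialternating_ss s (longest_semialternating_ss s)

-- ===== LEMMAS AND PROOFS =====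

-- abstract per-character machine: state (prev char, run length, window length, answer)
def mloop : List Char → Char → Int → Int → Int → Int
  | [], _, _, _, ans => ans
  | c :: rest, p, run, cur, ans =>
    if c = p then
      if run + 1 = 2 then mloop rest p (run + 1) (cur + 1) (max ans (cur + 1))
      else mloop rest p (run + 1) 2 ans
    else mloop rest c 1 (cur + 1) (max ans (cur + 1))

theorem aloopA_eq_mloop (rest : List Char) : ∀ (e b : Int) (comp : Char) (count m : Int),
    1 ≤ count → aloopA rest e b comp count m = mloop rest comp count (e - b) m := by
  induction rest with
  | nil => intros; rfl
  | cons c t ih =>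
    intro e b comp count m hc
    simp only [aloopA, mloop]
    by_cases hec : c = comp
    · simp only [if_pos hec]
      by_cases h2 : count + 1 = 2
      · simp only [if_pos h2]
        rw [ih (e + 1) b comp (count + 1) _ (by omega)]
        have h1 : e + 1 - b = e - b + 1 := by ring
        have h3 : (if e - b + 1 > m then e - b + 1 else m) = max m (e - b + 1) := by
          rcases le_or_gt (e - b + 1) m with h | h <;> simp [max_def] <;> omega
        rw [h1, h3]
      · simp only [if_neg h2]
        have h3 : count + 1 > 2 := by omega
        simp only [if_pos h3]
        rw [ih (e + 1) (e - 1) comp (count + 1) m (by omega)]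
        have h4 : e + 1 - (e - 1) = 2 := by ring
        rw [h4]
    · simp only [if_neg hec]
      rw [ih (e + 1) b c 1 _ (by omega)]
      have h1 : e + 1 - b = e - b + 1 := by ring
      have h3 : (if e - b + 1 > m then e - b + 1 else m) = max m (e - b + 1) := by
        rcases le_or_gt (e - b + 1) m with h | h <;> simp [max_def] <;> omega
      rw [h1, h3]

-- processing further equal chars when the run already has length ≥ 2
theorem mloop_same2 (c : Char) : ∀ (t rest : List Char) (run cur ans : Int),
    (∀ x ∈ t, x = c) → 2 ≤ run →
    mloop (t ++ rest) c run cur ans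
      = mloop rest c (run + t.length) (if t.isEmpty then cur else 2) ans := by
  intro t
  induction t with
  | nil => intro rest run cur ans _ _; simp
  | cons x t ih =>
    intro rest run cur ans hall hrun
    have hx : x = c := hall x (by simp)
    simp only [List.cons_append, mloop, if_pos hx]
    have : ¬ (run + 1 = 2) := by omega
    simp only [if_neg this]
    rw [ih rest (run + 1) 2 ans (fun y hy => hall y (by simp [hy])) (by omega)]
    have h1 : run + 1 + (t.length : Int) = run + (t.length + 1 : Nat) := by push_cast; ring
    simp only [List.isEmpty_cons, List.length_cons, h1]
    congr 1
    split <;> rfl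

theorem head_dropWhile_ne (c : Char) : ∀ (cs : List Char) (c' : Char) (r' : List Char),
    cs.dropWhile (· == c) = c' :: r' → ¬ (c' = c) := by
  intro cs
  induction cs with
  | nil => intro c' r' h; simp [List.dropWhile] at h
  | cons x t ih =>
    intro c' r' h
    by_cases hx : x = c
    · rw [List.dropWhile_cons_of_pos (by simp [hx])] at h
      exact ih c' r' h
    · rw [List.dropWhile_cons_of_neg (by simp [hx])] at h
      injection h with h1 h2
      subst h1; exact hx

-- main run lemma: mloop after consuming the first char of a run equals B's fold
theorem mloop_eq_bfold : ∀ (n : Nat) (cs : List Char) (c : Char) (cur ans : Int),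
    cs.length ≤ n →
    mloop cs c 1 (cur + 1) (max ans (cur + 1))
      = ((runsOf (c :: cs)).foldl bstep (ans, cur)).1 := by
  intro n
  induction n with
  | zero =>
    intro cs c cur ans hlen
    have : cs = [] := List.length_eq_zero_iff.mp (Nat.le_zero.mp hlen)
    subst this
    norm_num [mloop, runsOf, bstep]
  | succ n ih =>
    intro cs c cur ans hlen
    have hsplit : cs.takeWhile (· == c) ++ cs.dropWhile (· == c) = cs :=
      List.takeWhile_append_dropWhile
    cases ht : cs.takeWhile (· == c) with
    | nil =>
      cases hcs : cs with
      | nil => norm_num [mloop, runsOf, bstep]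
      | cons c' r' =>
        have hne : ¬ (c' = c) := by
          intro h
          rw [hcs, List.takeWhile_cons_of_pos (by simp [h])] at ht
          simp at ht
        have hdrop : cs.dropWhile (· == c) = c' :: r' := by
          rw [hcs, List.dropWhile_cons_of_neg (by simp [hne])]
        simp only [mloop, if_neg hne]
        rw [ih r' c' (cur + 1) (max ans (cur + 1)) (by
          rw [hcs] at hlen; simp only [List.length_cons] at hlen; omega)]
        conv_rhs => rw [runsOf]
        rw [List.takeWhile_cons_of_neg (by simp [hne]), List.dropWhile_cons_of_neg (by simp [hne])]
        simp only [List.foldl_cons]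
        have : bstep (ans, cur) (c, (List.length ([] : List Char) : Int) + 1)
            = (max ans (cur + 1), cur + 1) := by norm_num [bstep]
        rw [this]
    | cons x t' =>
      have hmem : ∀ y ∈ x :: t', y = c := by
        intro y hy
        have := List.mem_takeWhile_imp (ht ▸ hy)
        simpa using this
      have hx : x = c := hmem x (by simp)
      have hcs2 : cs = x :: (t' ++ cs.dropWhile (· == c)) := by
        conv_lhs => rw [← hsplit]
        rw [ht]; simp
      conv_lhs => rw [hcs2]
      simp only [mloop, if_pos hx]
      norm_num
      rw [show cur + 1 + 1 = cur + 2 by ring]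
      rw [mloop_same2 c t' (cs.dropWhile (· == c)) 2 (cur + 2) (max ans (cur + 2))
        (fun y hy => hmem y (by simp [hy])) (by omega)]
      have hL : ((cs.takeWhile (· == c)).length : Int) + 1 = (t'.length : Int) + 2 := by
        rw [ht]; push_cast [List.length_cons]; ring
      have hbstep : bstep (ans, cur) (c, ((cs.takeWhile (· == c)).length : Int) + 1)
          = (max ans (cur + 2), if t'.isEmpty then cur + 2 else 2) := by
        rw [hL]
        cases t' with
        | nil => norm_num [bstep]
        | cons a b =>
          have : (((a :: b).length : Int) + 2) ≥ 3 := by simp only [List.length_cons]; push_cast; omega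
          simp only [bstep, if_pos this, List.isEmpty_cons, if_neg Bool.false_ne_true]
      cases hr : cs.dropWhile (· == c) with
      | nil =>
        conv_rhs => rw [runsOf]
        rw [hr]
        simp only [List.foldl_cons, hbstep, mloop]
        rw [runsOf]
        simp
      | cons c'' r'' =>
        have hne : ¬ (c'' = c) := head_dropWhile_ne c cs c'' r'' hr
        simp only [mloop, if_neg hne]
        have hlen'' : r''.length ≤ n := by
          have h1 : (cs.dropWhile (· == c)).length ≤ cs.length := List.length_dropWhile_le _ _
          rw [hr] at h1
          simp only [List.length_cons] at h1
          omega
        rw [ih r'' c'' _ _ hlen'']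
        conv_rhs => rw [runsOf]
        rw [hr]
        simp only [List.foldl_cons, hbstep]

-- ===== VERDICT (by name: the statement is the Claim_ definition above) =====
theorem longest_semialternating_ss_spec : Claim_equal_longest_semialternating_ss := by
  unfold Claim_equal_longest_semialternating_ss Spec_longest_semialternating_ss
  intro s _
  unfold longest_semialternating_ss longest_semialternating_ss_alt
  cases hl : s.toList with
  | nil => norm_num [runsOf]
  | cons c cs =>
    cases cs with
    | nil => norm_num [runsOf, bstep, aloopA, mloop]
    | cons d cs2 =>
      cases cs2 with
      | nil =>
        by_cases hd : d = c
        · subst hd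
          norm_num [runsOf, bstep, List.takeWhile, List.dropWhile]
          simp
        · have hb : (d == c) = false := by simp [hd]
          norm_num [runsOf, bstep, List.takeWhile, List.dropWhile, hb]
          simp
      | cons e cs3 =>
        have hlen : ¬ (((c :: d :: e :: cs3).length : Int) < 3) := by
          simp only [List.length_cons]; push_cast; omega
        have hne : ¬ ((c :: d :: e :: cs3) = [] ∨ ((c :: d :: e :: cs3).length : Int) = 0) := by
          simp only [List.length_cons]; push_cast
          rintro (h | h)
          · exact h.elim
          · omega
        simp only [if_neg hne, if_neg hlen]
        rw [aloopA_eq_mloop (d :: e :: cs3) 1 0 c 1 1 (by omega)]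
        have h1 : (1 : Int) - 0 = 0 + 1 := by ring
        have h2 : (1 : Int) = max 0 (0 + 1) := by norm_num
        rw [h1]
        conv_lhs => rw [h2]
        exact mloop_eq_bfold (d :: e :: cs3).length (d :: e :: cs3) c 0 0 le_rfl
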